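-- pv_equiv track=rewrite | github.com/aignas/project_euler | src/520-530/521.py | series_gen
-- ===== SOURCE A (Python) =====
-- def series_gen(n):
--     """
--     5, 7, 11, 13, 17
--     """
--     i = -1
--     k = 1
--     m = 6 * k + i
--     while n >= m:
--         yield m
--         i = -i
--         if i == -1:
--             k += 1
--         m = 6 * k + i
-- ===== SOURCE B (Python) =====
-- def series_gen(n):
--     for m in range(5, n + 1):
--         if m % 6 in (1, 5):
--             yield m
-- ===== Notes on version B (the rewrite author's own statement) =====
-- stated objective: idiomatic
-- what changed: Replaces A's sign-toggling state machine (i,k,m with branch-dependent updates) by a direct scan of every integer from 5 to n filtered by residue mod 6 being 1 or 5.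
import Mathlib
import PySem

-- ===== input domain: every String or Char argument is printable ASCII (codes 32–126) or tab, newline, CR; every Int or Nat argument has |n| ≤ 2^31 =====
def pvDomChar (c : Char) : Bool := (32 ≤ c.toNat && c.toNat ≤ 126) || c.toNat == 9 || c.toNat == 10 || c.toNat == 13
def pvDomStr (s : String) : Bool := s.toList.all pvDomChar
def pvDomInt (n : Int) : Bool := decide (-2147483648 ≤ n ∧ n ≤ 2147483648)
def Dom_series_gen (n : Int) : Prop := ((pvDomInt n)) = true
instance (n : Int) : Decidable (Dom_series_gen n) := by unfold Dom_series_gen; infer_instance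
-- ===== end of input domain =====

-- B replaces A's sign-toggling state machine by a scan of 5..n filtered by residue mod 6 (idiomatic; not faster).
-- Both Pythons are generators; the ports return the list of yielded values.

-- ===== PORT A =====
-- A's while loop: state (i, k) with i toggling between -1 and 1 (encoded as the Bool 'neg',
-- neg ↔ i = -1); k advances when i returns to -1; m = 6*k + i is yielded while n >= m.
def series_gen_loop (n k : Int) (neg : Bool) : List Int :=
  let i : Int := if neg then -1 else 1
  let m := 6 * k + i
  if h : n ≥ m then
    if neg then m :: series_gen_loop n k false
    else m :: series_gen_loop n (k + 1) true
  else []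
termination_by (n + 2 - (6 * k + (if neg then -1 else 1))).toNat
decreasing_by
  · rename_i hneg; subst hneg; simp only [i, m] at h; simp at h ⊢; omega
  · rename_i hneg; simp only [Bool.not_eq_true] at hneg; subst hneg
    simp only [i, m] at h; simp at h ⊢; omega

def series_gen (n : Int) : List Int := series_gen_loop n 1 true

-- ===== PORT B =====
-- B: for m in range(5, n+1): if m % 6 in (1, 5): yield m
def series_gen_alt (n : Int) : List Int :=
  (PySem.List.pyRange 5 (n + 1) 1).filter
    (fun m => PySem.Int.mod m 6 == 1 || PySem.Int.mod m 6 == 5)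

-- ===== PRECONDITION & SPEC =====
def Spec_series_gen (n : Int) (out : List Int) : Prop := out = series_gen_alt n
instance (n : Int) (out : List Int) : Decidable (Spec_series_gen n out) := by unfold Spec_series_gen; infer_instance

-- ===== CLAIM (what is proved, stated in full; the proofs are below) =====
def Claim_equal_series_gen : Prop := ∀ (n : Int), Dom_series_gen n → Spec_series_gen n (series_gen n)

-- ===== LEMMAS AND PROOFS =====

def pvPred (m : Int) : Bool := PySem.Int.mod m 6 == 1 || PySem.Int.mod m 6 == 5

lemma pvPred_eq (m : Int) : pvPred m = (m % 6 == 1 || m % 6 == 5) := by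
  simp [pvPred]

lemma filter_pyRange_skip (a b : Int) (h : pvPred a = false) :
    (PySem.List.pyRange a b 1).filter pvPred = (PySem.List.pyRange (a + 1) b 1).filter pvPred := by
  by_cases h2 : a < b
  · rw [PySem.List.pyRange_one_cons h2]; simp [h]
  · rw [PySem.List.pyRange_one_eq_nil (by omega), PySem.List.pyRange_one_eq_nil (by omega)]

lemma series_gen_loop_eq (n k : Int) (neg : Bool) :
    series_gen_loop n k neg =
      (PySem.List.pyRange (6 * k + (if neg then -1 else 1)) (n + 1) 1).filter pvPred := by
  fun_induction series_gen_loop n k neg with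
  | case1 k i m h ih =>
    simp only [i, m] at h ih ⊢
    norm_num at h ih ⊢
    rw [PySem.List.pyRange_one_cons (show (6:Int) * k + -1 < n + 1 by omega),
        List.filter_cons_of_pos (by rw [pvPred_eq]; simp; try omega),
        show (6:Int) * k + -1 + 1 = 6 * k by ring,
        filter_pyRange_skip (6 * k) _ (by rw [pvPred_eq]; simp; try omega)]
    rw [ih]
  | case2 k neg i m h hneg ih =>
    simp only [Bool.not_eq_true] at hneg; subst hneg
    simp only [i, m] at h ih ⊢
    norm_num at h ih ⊢
    rw [PySem.List.pyRange_one_cons (show (6:Int) * k + 1 < n + 1 by omega),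
        List.filter_cons_of_pos (by rw [pvPred_eq]; simp; try omega),
        show (6:Int) * k + 1 + 1 = 6 * k + 2 by ring,
        filter_pyRange_skip (6 * k + 2) _ (by rw [pvPred_eq]; simp; try omega),
        show (6:Int) * k + 2 + 1 = 6 * k + 3 by ring,
        filter_pyRange_skip (6 * k + 3) _ (by rw [pvPred_eq]; simp; try omega),
        show (6:Int) * k + 3 + 1 = 6 * k + 4 by ring,
        filter_pyRange_skip (6 * k + 4) _ (by rw [pvPred_eq]; simp; try omega),
        show (6:Int) * k + 4 + 1 = 6 * (k + 1) + -1 by ring]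
    rw [ih]
  | case3 k neg i m h =>
    simp only [i, m] at h
    rw [PySem.List.pyRange_one_eq_nil (by cases neg <;> simp_all)]
    simp

-- ===== VERDICT (by name: the statement is the Claim_ definition above) =====
theorem series_gen_spec : Claim_equal_series_gen := by
  intro n _
  show series_gen n = series_gen_alt n
  rw [series_gen, series_gen_loop_eq]
  norm_num [series_gen_alt]
  exact List.filter_congr (fun x _ => by rw [pvPred_eq])
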